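-- pv_equiv track=rewrite | github.com/mcleanT/AutoReview | autoreview/output/formatter.py | _markdown_body_to_latex
-- ===== SOURCE A (Python) =====
-- def _latex_escape(text: str) -> str:
--     """Escape special LaTeX characters."""
--     special = {"&": r"\&", "%": r"\%", "$": r"\$", "#": r"\#", "_": r"\_",
--                "{": r"\{", "}": r"\}", "~": r"\textasciitilde{}", "^": r"\^{}"}
--     for char, replacement in special.items():
--         text = text.replace(char, replacement)
--     return text
--
-- def _markdown_body_to_latex(md: str) -> str:
--     """Convert Markdown body text to LaTeX sectioning commands.
--
--     This converts only the body content (headings, paragraphs). It does NOT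
--     produce a full document -- the Jinja2 template handles the preamble,
--     \\begin{document}, bibliography, and \\end{document}.
--     """
--     lines = md.split("\n")
--     result: list[str] = []
--
--     for line in lines:
--         if line.startswith("# "):
--             # Top-level heading becomes section (title is handled by template)
--             result.append(f"\\section{{{_latex_escape(line[2:])}}}")
--         elif line.startswith("## "):
--             result.append(f"\\section{{{_latex_escape(line[3:])}}}")
--         elif line.startswith("### "):
--             result.append(f"\\subsection{{{_latex_escape(line[4:])}}}")
--         elif line.startswith("#### "):
--             result.append(f"\\subsubsection{{{_latex_escape(line[5:])}}}")
--         else: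
--             result.append(line)
--
--     return "\n".join(result)
-- ===== SOURCE B (Python) =====
-- _ESC = {"&": r"\&", "%": r"\%", "$": r"\$", "#": r"\#", "_": r"\_",
--         "{": r"\{", "}": r"\}", "~": r"\textasciitilde{}", "^": r"\^{}"}
-- _CMD = ("section", "section", "subsection", "subsubsection")
--
--
-- def _markdown_body_to_latex(md: str) -> str:
--     # Single character-level scan over the raw string: no split/join into a
--     # line list, and titles are escaped char-by-char via a lookup table
--     # instead of nine sequential whole-string replace passes.
--     out = []
--     pos = 0
--     n = len(md)
--     while True:
--         k = pos
--         while k < n and md[k] == "#":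
--             k += 1
--         h = k - pos
--         if 1 <= h <= 4 and k < n and md[k] == " ":
--             out.append("\\" + _CMD[h - 1] + "{")
--             i = k + 1
--             while i < n and md[i] != "\n":
--                 out.append(_ESC.get(md[i], md[i]))
--                 i += 1
--             out.append("}")
--         else:
--             i = pos
--             while i < n and md[i] != "\n":
--                 out.append(md[i])
--                 i += 1
--         if i >= n:
--             break
--         out.append("\n")
--         pos = i + 1
--     return "".join(out)
-- ===== Notes on version B (the rewrite author's own statement) =====
-- stated objective: alternative
-- what changed: Replaces A's split-into-lines / per-line startswith chain / join pipeline by a single character-level scan of the raw string that recognises heading starts in place and escapes title characters one at a time through a lookup table, instead of A's nine sequential whole-string replace passes inside _latex_escape.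
import Mathlib
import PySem

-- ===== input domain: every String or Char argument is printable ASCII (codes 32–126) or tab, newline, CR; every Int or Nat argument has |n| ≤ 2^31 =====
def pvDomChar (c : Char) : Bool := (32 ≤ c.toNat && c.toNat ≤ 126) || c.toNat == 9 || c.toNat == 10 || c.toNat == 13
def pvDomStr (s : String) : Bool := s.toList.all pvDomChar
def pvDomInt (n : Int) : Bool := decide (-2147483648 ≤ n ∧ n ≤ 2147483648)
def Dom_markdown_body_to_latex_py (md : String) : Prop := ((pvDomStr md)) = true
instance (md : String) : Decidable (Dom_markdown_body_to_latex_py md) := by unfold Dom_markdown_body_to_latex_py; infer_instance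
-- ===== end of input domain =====

-- B replaces A's split-lines / startswith-chain / join pipeline by a single character-level
-- scan that recognises headings in place and escapes titles char-by-char via a lookup table
-- (objective: alternative algorithm, same cost).


-- ===== PORT A =====
-- A's helper `_latex_escape`: the chain of nine whole-string str.replace calls

def pvEscape (cs : List Char) : List Char :=
  let cs := PySem.Chars.replace cs ['&'] ['\\', '&']
  let cs := PySem.Chars.replace cs ['%'] ['\\', '%']
  let cs := PySem.Chars.replace cs ['$'] ['\\', '$']
  let cs := PySem.Chars.replace cs ['#'] ['\\', '#']
  let cs := PySem.Chars.replace cs ['_'] ['\\', '_']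
  let cs := PySem.Chars.replace cs ['{'] ['\\', '{']
  let cs := PySem.Chars.replace cs ['}'] ['\\', '}']
  let cs := PySem.Chars.replace cs ['~'] "\\textasciitilde{}".toList
  let cs := PySem.Chars.replace cs ['^'] "\\^{}".toList
  cs

-- A's per-line elif chain of startswith tests

def pvALine (cs : List Char) : List Char :=
  if PySem.Chars.startswith cs ['#', ' '] then
    "\\section{".toList ++ pvEscape (cs.drop 2) ++ ['}']
  else if PySem.Chars.startswith cs ['#', '#', ' '] then
    "\\section{".toList ++ pvEscape (cs.drop 3) ++ ['}']
  else if PySem.Chars.startswith cs ['#', '#', '#', ' '] then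
    "\\subsection{".toList ++ pvEscape (cs.drop 4) ++ ['}']
  else if PySem.Chars.startswith cs ['#', '#', '#', '#', ' '] then
    "\\subsubsection{".toList ++ pvEscape (cs.drop 5) ++ ['}']
  else cs

def markdown_body_to_latex_py (md : String) : String :=
  String.mk (PySem.Chars.join ['\n']
    ((PySem.Chars.splitOn md.toList ['\n']).foldl (fun acc line => acc ++ [pvALine line]) []))

-- ===== PORT B =====
-- B's _ESC table and per-char lookup _ESC.get(md[i], md[i])

def pvEscDict : PySem.Dict Char (List Char) :=
  PySem.Dict.ofList [('&', "\\&".toList), ('%', "\\%".toList), ('$', "\\$".toList),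
    ('#', "\\#".toList), ('_', "\\_".toList), ('{', "\\{".toList), ('}', "\\}".toList),
    ('~', "\\textasciitilde{}".toList), ('^', "\\^{}".toList)]

def pvEscChar (c : Char) : List Char := (PySem.Dict.get? pvEscDict c).getD [c]

-- B's _CMD tuple

def pvCmdList : List (List Char) :=
  ["section".toList, "section".toList, "subsection".toList, "subsubsection".toList]

-- the inner `while md[k] == "#"` hash-run counter

def pvHashRun : List Char → Nat
  | [] => 0
  | c :: t => if c = '#' then pvHashRun t + 1 else 0

-- the heading-title scan `while i < n and md[i] != "\n"`, emitting escaped chars;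
-- returns the emitted output and the unscanned remainder

def pvTitle : List Char → List Char × List Char
  | [] => ([], [])
  | c :: t =>
    if c = '\n' then ([], c :: t)
    else
      let r := pvTitle t
      (pvEscChar c ++ r.1, r.2)

-- the plain-line copy scan `while i < n and md[i] != "\n"`

def pvPlain : List Char → List Char × List Char
  | [] => ([], [])
  | c :: t =>
    if c = '\n' then ([], c :: t)
    else
      let r := pvPlain t
      (c :: r.1, r.2)

-- bounds on the scanners' remainders, cited by pvScan's termination proof

theorem pvTitle_snd_le (cs : List Char) : (pvTitle cs).2.length ≤ cs.length := by
  induction cs with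
  | nil => simp [pvTitle]
  | cons c t ih =>
    simp only [pvTitle]
    split
    · simp
    · simpa using Nat.le_succ_of_le ih

theorem pvPlain_snd_le (cs : List Char) : (pvPlain cs).2.length ≤ cs.length := by
  induction cs with
  | nil => simp [pvPlain]
  | cons c t ih =>
    simp only [pvPlain]
    split
    · simp
    · simpa using Nat.le_succ_of_le ih

-- B's outer `while True` loop: one line per iteration, directly on the raw characters

def pvScan (cs : List Char) : List Char :=
  let h := pvHashRun cs
  if hc : 1 ≤ h ∧ h ≤ 4 ∧ (cs.drop h).head? = some ' ' then
    match hr : pvTitle (cs.drop (h + 1)) with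
    | (o, []) => ['\\'] ++ pvCmdList.getD (h - 1) [] ++ ['{'] ++ o ++ ['}']
    | (o, _ :: t) =>
      ['\\'] ++ pvCmdList.getD (h - 1) [] ++ ['{'] ++ o ++ ['}'] ++ '\n' :: pvScan t
  else
    match hr : pvPlain cs with
    | (o, []) => o
    | (o, _ :: t) => o ++ '\n' :: pvScan t
termination_by cs.length
decreasing_by
  · have hle := pvTitle_snd_le (cs.drop (h + 1))
    rw [hr] at hle
    simp only [List.length_cons, List.length_drop] at hle ⊢
    omega
  · have hle := pvPlain_snd_le cs
    rw [hr] at hle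
    simp only [List.length_cons] at hle ⊢
    omega

def markdown_body_to_latex_py_alt (md : String) : String := String.mk (pvScan md.toList)

-- ===== PRECONDITION & SPEC =====
def Spec_markdown_body_to_latex_py (md : String) (out : String) : Prop := out = markdown_body_to_latex_py_alt md
instance (md : String) (out : String) : Decidable (Spec_markdown_body_to_latex_py md out) := by unfold Spec_markdown_body_to_latex_py; infer_instance

-- ===== CLAIM (what is proved, stated in full; the proofs are below) =====
def Claim_equal_markdown_body_to_latex_py : Prop := ∀ (md : String), Dom_markdown_body_to_latex_py md → Spec_markdown_body_to_latex_py md (markdown_body_to_latex_py md)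

-- ===== LEMMAS AND PROOFS =====

-- `str.replace` with a single-char pattern is a per-char flatMap

theorem pv_replace_go (a : Char) (r : List Char) :
    ∀ (fuel : Nat) (l acc : List Char), l.length ≤ fuel →
      PySem.Chars.replace.go [a] r fuel l acc =
        acc.reverse ++ l.flatMap (fun c => if c = a then r else [c]) := by
  intro fuel
  induction fuel with
  | zero =>
    intro l acc h
    have : l = [] := List.eq_nil_of_length_eq_zero (Nat.le_zero.1 h)
    subst this
    simp [PySem.Chars.replace.go]
  | succ f ih =>
    intro l acc h
    cases l with
    | nil => simp [PySem.Chars.replace.go]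
    | cons c t =>
      by_cases hca : c = a
      · subst hca
        rw [PySem.Chars.replace.go]
        simp only [List.isPrefixOf, beq_self_eq_true, Bool.true_and, if_true,
          List.length_cons, List.length_nil, List.drop_succ_cons, List.drop_zero]
        rw [ih t (r.reverse ++ acc) (by simpa using Nat.le_of_succ_le_succ h)]
        simp
      · rw [PySem.Chars.replace.go]
        have hp : [a].isPrefixOf (c :: t) = false := by
          simp [List.isPrefixOf]
          exact fun hh => absurd hh.symm hca
        rw [hp, if_neg (by simp)]
        rw [ih t (c :: acc) (by simpa using Nat.le_of_succ_le_succ h)]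
        simp [hca]

theorem pv_replace_single (cs : List Char) (a : Char) (r : List Char) :
    PySem.Chars.replace cs [a] r = cs.flatMap (fun c => if c = a then r else [c]) := by
  rw [PySem.Chars.replace, if_neg (by simp)]
  simpa using pv_replace_go a r cs.length cs [] (le_refl _)

-- A's nine sequential replaces equal B's per-char escape table

theorem pvEscape_eq (l : List Char) : pvEscape l = l.flatMap pvEscChar := by
  unfold pvEscape
  simp only [pv_replace_single, List.flatMap_assoc]
  apply List.flatMap_congr
  intro c _
  by_cases h1 : c = '&'; · subst h1; decide
  by_cases h2 : c = '%'; · subst h2; decide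
  by_cases h3 : c = '$'; · subst h3; decide
  by_cases h4 : c = '#'; · subst h4; decide
  by_cases h5 : c = '_'; · subst h5; decide
  by_cases h6 : c = '{'; · subst h6; decide
  by_cases h7 : c = '}'; · subst h7; decide
  by_cases h8 : c = '~'; · subst h8; decide
  by_cases h9 : c = '^'; · subst h9; decide
  have g1 : ('&' == c) = false := by simp; exact fun h => h1 h.symm
  have g2 : ('%' == c) = false := by simp; exact fun h => h2 h.symm
  have g3 : ('$' == c) = false := by simp; exact fun h => h3 h.symm
  have g4 : ('#' == c) = false := by simp; exact fun h => h4 h.symm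
  have g5 : ('_' == c) = false := by simp; exact fun h => h5 h.symm
  have g6 : ('{' == c) = false := by simp; exact fun h => h6 h.symm
  have g7 : ('}' == c) = false := by simp; exact fun h => h7 h.symm
  have g8 : ('~' == c) = false := by simp; exact fun h => h8 h.symm
  have g9 : ('^' == c) = false := by simp; exact fun h => h9 h.symm
  simp [h1, h2, h3, h4, h5, h6, h7, h8, h9, g1, g2, g3, g4, g5, g6, g7, g8, g9, pvEscChar, pvEscDict, PySem.Dict.get?,
    PySem.Dict.ofList, PySem.Dict.update, PySem.Dict.empty, PySem.Dict.insert, List.find?]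

-- the line list `md.split("\n")` as a structural recursion

def pvLines : List Char → List (List Char)
  | [] => [[]]
  | c :: t =>
    if c = '\n' then [] :: pvLines t
    else
      match pvLines t with
      | [] => [[c]]
      | l :: ls => (c :: l) :: ls

theorem pvLines_ne_nil (cs : List Char) : pvLines cs ≠ [] := by
  cases cs with
  | nil => simp [pvLines]
  | cons c t =>
    simp only [pvLines]
    split
    · simp
    · split <;> simp

theorem pv_splitOn_go :
    ∀ (fuel : Nat) (l cur : List Char) (acc : List (List Char)), l.length < fuel →
      PySem.Chars.splitOn.go ['\n'] fuel l cur acc =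
        acc.reverse ++ (match pvLines l with
          | [] => [cur.reverse]
          | x :: xs => (cur.reverse ++ x) :: xs) := by
  intro fuel
  induction fuel with
  | zero => intro l cur acc h; omega
  | succ f ih =>
    intro l cur acc h
    cases l with
    | nil => simp [PySem.Chars.splitOn.go, pvLines]
    | cons c t =>
      by_cases hc : c = '\n'
      · subst hc
        rw [PySem.Chars.splitOn.go]
        simp only [List.isPrefixOf, beq_self_eq_true, Bool.true_and,
          if_true, List.length_cons, List.length_nil, List.drop_succ_cons, List.drop_zero]
        rw [ih t [] (cur.reverse :: acc) (by simpa using h)]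
        cases htl : pvLines t with
        | nil => exact absurd htl (pvLines_ne_nil t)
        | cons x xs => simp [pvLines, htl]
      · rw [PySem.Chars.splitOn.go]
        have hp : List.isPrefixOf ['\n'] (c :: t) = false := by
          simp [List.isPrefixOf]
          exact fun hh => absurd hh.symm hc
        rw [hp, if_neg (by simp)]
        rw [ih t (c :: cur) acc (by simpa using h)]
        cases htl : pvLines t with
        | nil => exact absurd htl (pvLines_ne_nil t)
        | cons x xs => simp [pvLines, hc, htl]

theorem pv_splitOn_eq (cs : List Char) : PySem.Chars.splitOn cs ['\n'] = pvLines cs := by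
  rw [PySem.Chars.splitOn, pv_splitOn_go (cs.length + 1) cs [] [] (by omega)]
  cases htl : pvLines cs with
  | nil => exact absurd htl (pvLines_ne_nil cs)
  | cons x xs => simp

theorem pvLines_unfold (cs : List Char) :
    pvLines cs = cs.takeWhile (· ≠ '\n') ::
      (match cs.dropWhile (· ≠ '\n') with | [] => [] | _ :: t => pvLines t) := by
  induction cs with
  | nil => simp [pvLines]
  | cons c t ih =>
    by_cases hc : c = '\n'
    · subst hc
      simp [pvLines, List.takeWhile, List.dropWhile]
    · rw [List.takeWhile_cons_of_pos (by simp [hc]), List.dropWhile_cons_of_pos (by simp [hc])]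
      simp only [pvLines, if_neg hc]
      rw [ih]

-- the scanners compute takeWhile/dropWhile at the next newline

theorem pvTitle_eq (cs : List Char) :
    pvTitle cs = ((cs.takeWhile (· ≠ '\n')).flatMap pvEscChar, cs.dropWhile (· ≠ '\n')) := by
  induction cs with
  | nil => simp [pvTitle]
  | cons c t ih =>
    by_cases hc : c = '\n'
    · subst hc; simp [pvTitle, List.takeWhile, List.dropWhile]
    · rw [List.takeWhile_cons_of_pos (by simp [hc]), List.dropWhile_cons_of_pos (by simp [hc])]
      simp [pvTitle, hc, ih]

theorem pvPlain_eq (cs : List Char) :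
    pvPlain cs = (cs.takeWhile (· ≠ '\n'), cs.dropWhile (· ≠ '\n')) := by
  induction cs with
  | nil => simp [pvPlain]
  | cons c t ih =>
    by_cases hc : c = '\n'
    · subst hc; simp [pvPlain, List.takeWhile, List.dropWhile]
    · rw [List.takeWhile_cons_of_pos (by simp [hc]), List.dropWhile_cons_of_pos (by simp [hc])]
      simp [pvPlain, hc, ih]

-- decomposing a line at its leading hash run

theorem pv_take_hash (cs : List Char) :
    cs.takeWhile (· ≠ '\n') =
      List.replicate (pvHashRun cs) '#' ++ ((cs.drop (pvHashRun cs)).takeWhile (· ≠ '\n')) := by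
  induction cs with
  | nil => simp [pvHashRun]
  | cons c t ih =>
    by_cases hc : c = '#'
    · subst hc
      rw [List.takeWhile_cons_of_pos (by decide)]
      have e : pvHashRun ('#' :: t) = pvHashRun t + 1 := by simp [pvHashRun]
      rw [e, List.replicate_succ, List.cons_append, List.drop_succ_cons, ih]
    · simp [pvHashRun, hc]

theorem pv_drop_hash (cs : List Char) :
    cs.dropWhile (· ≠ '\n') = (cs.drop (pvHashRun cs)).dropWhile (· ≠ '\n') := by
  induction cs with
  | nil => simp [pvHashRun]
  | cons c t ih =>
    by_cases hc : c = '#'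
    · subst hc
      rw [List.dropWhile_cons_of_pos (by decide)]
      have e : pvHashRun ('#' :: t) = pvHashRun t + 1 := by simp [pvHashRun]
      rw [e, List.drop_succ_cons]
      exact ih
    · simp [pvHashRun, hc]

theorem pv_hashRun_drop_head (cs : List Char) : (cs.drop (pvHashRun cs)).head? ≠ some '#' := by
  induction cs with
  | nil => simp
  | cons c t ih =>
    by_cases hc : c = '#'
    · subst hc; simpa [pvHashRun] using ih
    · simp [pvHashRun, hc]

theorem pv_hashRun_replicate (k : Nat) (l : List Char) :
    pvHashRun (List.replicate k '#' ++ l) = k + pvHashRun l := by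
  induction k with
  | zero => simp
  | succ k ih => simp [List.replicate_succ, pvHashRun, ih]; omega

theorem pv_hashRun_line (cs : List Char) :
    pvHashRun (cs.takeWhile (· ≠ '\n')) = pvHashRun cs := by
  rw [pv_take_hash cs, pv_hashRun_replicate]
  have hz : pvHashRun ((cs.drop (pvHashRun cs)).takeWhile (· ≠ '\n')) = 0 := by
    have hh := pv_hashRun_drop_head cs
    cases hd : cs.drop (pvHashRun cs) with
    | nil => simp [pvHashRun]
    | cons d t =>
      rw [hd] at hh
      simp at hh
      by_cases hdn : d = '\n'
      · subst hdn; simp [List.takeWhile, pvHashRun]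
      · rw [List.takeWhile_cons_of_pos (by simp [hdn])]
        simp [pvHashRun, hh]
  omega

-- A's startswith test for '#'*m followed by a space, characterised by the hash-run length

theorem pv_sw_iff (m : Nat) (cs : List Char) :
    PySem.Chars.startswith cs (List.replicate m '#' ++ [' ']) = true ↔
      (pvHashRun cs = m ∧ (cs.drop m).head? = some ' ') := by
  induction m generalizing cs with
  | zero =>
    cases cs with
    | nil => simp [PySem.Chars.startswith, pvHashRun]
    | cons c t =>
      constructor
      · intro h
        have hc : c = ' ' := by
          have := (PySem.Chars.startswith_iff _ _).1 h
          rcases this with ⟨u, hu⟩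
          simpa using congrArg (·.head?) hu.symm
        subst hc
        simp [pvHashRun]
      · rintro ⟨_, h2⟩
        have hc : c = ' ' := by simpa using h2
        subst hc
        rw [PySem.Chars.startswith_iff]
        simp
  | succ m ih =>
    cases cs with
    | nil =>
      rw [PySem.Chars.startswith_iff]
      simp [pvHashRun, List.replicate_succ]
    | cons c t =>
      rw [PySem.Chars.startswith_iff, List.replicate_succ, List.cons_append,
        List.cons_prefix_cons]
      constructor
      · rintro ⟨hc, hp⟩
        subst hc
        have := (ih t).1 (by rw [PySem.Chars.startswith_iff]; exact hp)
        simp [pvHashRun, this.1, this.2]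
      · rintro ⟨h1, h2⟩
        by_cases hc : c = '#'
        · subst hc
          simp only [pvHashRun, if_pos] at h1
          have hk : pvHashRun t = m := by omega
          refine ⟨rfl, ?_⟩
          rw [← PySem.Chars.startswith_iff]
          exact (ih t).2 ⟨hk, by simpa using h2⟩
        · simp [pvHashRun, hc] at h1

-- A's elif chain, characterised through the hash-run length and the space check

theorem pvALine_char (line : List Char) :
    pvALine line =
      (if 1 ≤ pvHashRun line ∧ pvHashRun line ≤ 4 ∧ (line.drop (pvHashRun line)).head? = some ' '
       then ['\\'] ++ pvCmdList.getD (pvHashRun line - 1) [] ++ ['{']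
              ++ pvEscape (line.drop (pvHashRun line + 1)) ++ ['}']
       else line) := by
  have h1 := pv_sw_iff 1 line
  have h2 := pv_sw_iff 2 line
  have h3 := pv_sw_iff 3 line
  have h4 := pv_sw_iff 4 line
  simp only [List.replicate, List.cons_append, List.nil_append] at h1 h2 h3 h4
  unfold pvALine
  by_cases hg : 1 ≤ pvHashRun line ∧ pvHashRun line ≤ 4 ∧ (line.drop (pvHashRun line)).head? = some ' '
  · rw [if_pos hg]
    obtain ⟨hlo, hhi, hsp⟩ := hg
    interval_cases h : (pvHashRun line)
    · rw [if_pos (h1.2 ⟨rfl, hsp⟩)]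
      have e : "\\section{".toList = ['\\'] ++ pvCmdList.getD 0 [] ++ ['{'] := by decide
      simp [e, List.append_assoc]
    · rw [if_neg (by intro hx; have := (h1.1 hx).1; omega),
        if_pos (h2.2 ⟨rfl, hsp⟩)]
      have e : "\\section{".toList = ['\\'] ++ pvCmdList.getD 1 [] ++ ['{'] := by decide
      simp [e, List.append_assoc]
    · rw [if_neg (by intro hx; have := (h1.1 hx).1; omega),
        if_neg (by intro hx; have := (h2.1 hx).1; omega),
        if_pos (h3.2 ⟨rfl, hsp⟩)]
      have e : "\\subsection{".toList = ['\\'] ++ pvCmdList.getD 2 [] ++ ['{'] := by decide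
      simp [e, List.append_assoc]
    · rw [if_neg (by intro hx; have := (h1.1 hx).1; omega),
        if_neg (by intro hx; have := (h2.1 hx).1; omega),
        if_neg (by intro hx; have := (h3.1 hx).1; omega),
        if_pos (h4.2 ⟨rfl, hsp⟩)]
      have e : "\\subsubsection{".toList = ['\\'] ++ pvCmdList.getD 3 [] ++ ['{'] := by decide
      simp [e, List.append_assoc]
  · rw [if_neg hg,
      if_neg (by intro hx; obtain ⟨hk, hs⟩ := h1.1 hx; exact hg ⟨by omega, by omega, by rw [hk]; exact hs⟩),
      if_neg (by intro hx; obtain ⟨hk, hs⟩ := h2.1 hx; exact hg ⟨by omega, by omega, by rw [hk]; exact hs⟩),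
      if_neg (by intro hx; obtain ⟨hk, hs⟩ := h3.1 hx; exact hg ⟨by omega, by omega, by rw [hk]; exact hs⟩),
      if_neg (by intro hx; obtain ⟨hk, hs⟩ := h4.1 hx; exact hg ⟨by omega, by omega, by rw [hk]; exact hs⟩)]

theorem pv_head_takeWhile (l : List Char) :
    ((l.takeWhile (· ≠ '\n')).head? = some ' ') ↔ (l.head? = some ' ') := by
  cases l with
  | nil => simp
  | cons c t =>
    by_cases hc : c = '\n'
    · subst hc; simp [List.takeWhile]
    · rw [List.takeWhile_cons_of_pos (by simp [hc])]; simp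

-- the heading test transfers between a line and the raw string it heads

theorem pv_cond_iff (cs : List Char) :
    (1 ≤ pvHashRun cs ∧ pvHashRun cs ≤ 4 ∧ (cs.drop (pvHashRun cs)).head? = some ' ') ↔
      (1 ≤ pvHashRun (cs.takeWhile (· ≠ '\n')) ∧ pvHashRun (cs.takeWhile (· ≠ '\n')) ≤ 4 ∧
        ((cs.takeWhile (· ≠ '\n')).drop (pvHashRun (cs.takeWhile (· ≠ '\n')))).head? = some ' ') := by
  rw [pv_hashRun_line]
  have e : (cs.takeWhile (· ≠ '\n')).drop (pvHashRun cs) =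
      (cs.drop (pvHashRun cs)).takeWhile (· ≠ '\n') := by
    rw [pv_take_hash cs, List.drop_left' (by simp)]
  rw [e, pv_head_takeWhile]

theorem pv_drop_succ_line (cs : List Char)
    (hsp : (cs.drop (pvHashRun cs)).head? = some ' ') :
    (cs.takeWhile (· ≠ '\n')).drop (pvHashRun cs + 1) =
      (cs.drop (pvHashRun cs + 1)).takeWhile (· ≠ '\n') ∧
    cs.dropWhile (· ≠ '\n') = (cs.drop (pvHashRun cs + 1)).dropWhile (· ≠ '\n') := by
  have hsplit : cs.drop (pvHashRun cs) = ' ' :: cs.drop (pvHashRun cs + 1) := by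
    cases hd : cs.drop (pvHashRun cs) with
    | nil => rw [hd] at hsp; simp at hsp
    | cons d t =>
      rw [hd] at hsp
      simp at hsp
      subst hsp
      have : t = (cs.drop (pvHashRun cs)).tail := by rw [hd]; rfl
      rw [this, List.tail_drop]
  constructor
  · rw [pv_take_hash cs, ← List.drop_drop, List.drop_left' (by simp), hsplit,
      List.takeWhile_cons_of_pos (by decide)]
    simp
  · rw [pv_drop_hash cs, hsplit, List.dropWhile_cons_of_pos (by decide)]

-- B's scan computes A's join-of-mapped-lines

theorem pvScan_eq (cs : List Char) :
    pvScan cs = PySem.Chars.join ['\n'] ((pvLines cs).map pvALine) := by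
  induction cs using pvScan.induct with
  | case1 cs h hc o hr =>
    simp only [show h = pvHashRun cs from rfl] at hc hr
    unfold pvScan
    rw [dif_pos hc]
    split
    · rename_i o' hr'
      rw [hr'] at hr
      injection hr with ho htl
      subst ho
      have hT := pvTitle_eq (cs.drop (pvHashRun cs + 1))
      rw [hr'] at hT
      injection hT with ho2 htl2
      obtain ⟨e1, e2⟩ := pv_drop_succ_line cs hc.2.2
      have hdw : cs.dropWhile (· ≠ '\n') = [] := by rw [e2, ← htl2]
      rw [pvLines_unfold cs, hdw]
      simp only [List.map_cons, List.map_nil, PySem.Chars.join_singleton]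
      rw [pvALine_char, if_pos ((pv_cond_iff cs).1 hc), pv_hashRun_line, e1, pvEscape_eq, ← ho2]
    · rename_i o' hd t hr'
      rw [hr'] at hr
      simp at hr
  | case2 cs h hc o hd t hr ih =>
    simp only [show h = pvHashRun cs from rfl] at hc hr
    unfold pvScan
    rw [dif_pos hc]
    split
    · rename_i o' hr'
      rw [hr'] at hr
      simp at hr
    · rename_i o' hd' t' hr'
      rw [hr'] at hr
      injection hr with ho htl
      injection htl with hhd htl
      subst ho; subst hhd; subst htl
      have hT := pvTitle_eq (cs.drop (pvHashRun cs + 1))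
      rw [hr'] at hT
      injection hT with ho2 htl2
      obtain ⟨e1, e2⟩ := pv_drop_succ_line cs hc.2.2
      have hdw : cs.dropWhile (· ≠ '\n') = hd' :: t' := by rw [e2, ← htl2]
      rw [pvLines_unfold cs, hdw]
      simp only [List.map_cons]
      cases hlt : pvLines t' with
      | nil => exact absurd hlt (pvLines_ne_nil t')
      | cons y ys =>
        rw [hlt] at ih
        simp only [List.map_cons] at ih
        simp only [List.map_cons]
        rw [PySem.Chars.join_cons_cons]
        rw [pvALine_char, if_pos ((pv_cond_iff cs).1 hc), pv_hashRun_line, e1, pvEscape_eq, ← ho2,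
          ih]
        simp
  | case3 cs h hc o hr =>
    simp only [show h = pvHashRun cs from rfl] at hc hr
    unfold pvScan
    rw [dif_neg hc]
    split
    · rename_i o' hr'
      rw [hr'] at hr
      injection hr with ho htl
      subst ho
      have hP := pvPlain_eq cs
      rw [hr'] at hP
      injection hP with ho2 htl2
      rw [pvLines_unfold cs, ← htl2]
      simp only [List.map_cons, List.map_nil, PySem.Chars.join_singleton]
      rw [pvALine_char, if_neg (fun hx => hc ((pv_cond_iff cs).2 hx)), ho2]
    · rename_i o' hd t hr'
      rw [hr'] at hr
      simp at hr
  | case4 cs h hc o hd t hr ih =>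
    simp only [show h = pvHashRun cs from rfl] at hc hr
    unfold pvScan
    rw [dif_neg hc]
    split
    · rename_i o' hr'
      rw [hr'] at hr
      simp at hr
    · rename_i o' hd' t' hr'
      rw [hr'] at hr
      injection hr with ho htl
      injection htl with hhd htl
      subst ho; subst hhd; subst htl
      have hP := pvPlain_eq cs
      rw [hr'] at hP
      injection hP with ho2 htl2
      rw [pvLines_unfold cs, ← htl2]
      simp only [List.map_cons]
      cases hlt : pvLines t' with
      | nil => exact absurd hlt (pvLines_ne_nil t')
      | cons y ys =>
        rw [hlt] at ih
        simp only [List.map_cons] at ih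
        simp only [List.map_cons]
        rw [PySem.Chars.join_cons_cons]
        rw [pvALine_char, if_neg (fun hx => hc ((pv_cond_iff cs).2 hx)), ho2, ih]
        simp

-- ===== VERDICT (by name: the statement is the Claim_ definition above) =====
theorem markdown_body_to_latex_py_spec : Claim_equal_markdown_body_to_latex_py := by
  intro md _
  unfold Spec_markdown_body_to_latex_py markdown_body_to_latex_py markdown_body_to_latex_py_alt
  rw [PySem.List.foldl_append_singleton_eq_map, pv_splitOn_eq, List.nil_append, pvScan_eq]
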